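-- pv_equiv track=rewrite | github.com/basind/TUBES-DASPRO | helper.py | findGame
-- ===== SOURCE A (Python) =====
-- def panjang(item):
--     # Helper panjang untuk mengecek panjang suatu item (list, string, dsb)
--
--     # KAMUS LOKAL
--     # counter : integer
--     # _ : iterator
--
--     # ALGORITMA
--     counter = 0
--     for _ in item:
--         counter += 1
--     return counter
--
-- def findGame (gameId, gamDb):
--     # Pengecek baris keberapa dan ketersediaan stok game
--
--     # KAMUS LOKAL
--     # barisGame, i: integer
--     # isAvail: boolean
--
--     # ALGORITMA
--     barisGame = 0
--     isAvail = True
--     for i in range(panjang(gamDb)):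
--         if (gamDb[i][0] == gameId):
--             barisGame = i
--             if (int(gamDb[i][5]) == 0):
--                 isAvail = False
--     return barisGame, isAvail
-- ===== SOURCE B (Python) =====
-- def findGame(gameId, gamDb):
--     idxs = [i for i, row in enumerate(gamDb) if row[0] == gameId]
--     barisGame = idxs[-1] if idxs else 0
--     isAvail = all(int(gamDb[i][5]) != 0 for i in idxs)
--     return barisGame, isAvail
-- ===== Notes on version B (the rewrite author's own statement) =====
-- stated objective: simpler
-- what changed: Replaces A's single index loop with mutable accumulators (plus a hand-rolled length helper) by one enumerate pass collecting matching indices, then two direct reductions: last index (default 0) and all(stock != 0).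
import Mathlib
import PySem

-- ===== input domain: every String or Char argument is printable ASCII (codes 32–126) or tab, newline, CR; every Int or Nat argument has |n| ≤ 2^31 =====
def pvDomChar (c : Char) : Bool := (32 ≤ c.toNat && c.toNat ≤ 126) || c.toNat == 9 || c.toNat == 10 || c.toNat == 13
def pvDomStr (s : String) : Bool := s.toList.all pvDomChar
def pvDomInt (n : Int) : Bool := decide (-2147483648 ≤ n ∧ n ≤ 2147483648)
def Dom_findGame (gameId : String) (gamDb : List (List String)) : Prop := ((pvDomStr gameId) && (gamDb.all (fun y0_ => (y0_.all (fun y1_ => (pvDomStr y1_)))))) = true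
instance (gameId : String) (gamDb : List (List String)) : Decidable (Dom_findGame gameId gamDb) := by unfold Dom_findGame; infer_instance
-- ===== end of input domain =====

-- B replaces A's single accumulating index loop (and hand-rolled length helper) by one
-- enumerate pass collecting matching indices plus two direct reductions; objective: simpler.
-- Pre_ excludes inputs where Python A raises (empty row: IndexError; matching row shorter
-- than 6 or with non-integer stock field: IndexError/ValueError).

-- ===== PORT A =====
-- helper 'panjang' (hand-rolled len via a counter loop)
def panjangPort {α : Type} (item : List α) : Int := item.foldl (fun c _ => c + 1) 0

-- pyGetD/getD 0 are exact under Pre_ (index in range, int() succeeds)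
def findGame (gameId : String) (gamDb : List (List String)) : Int × Bool :=
  (PySem.List.pyRange 0 (panjangPort gamDb) 1).foldl
    (fun (st : Int × Bool) i =>
      if PySem.List.pyGetD (PySem.List.pyGetD gamDb i []) 0 "" == gameId then
        (i, if (PySem.Int.ofStr? (PySem.List.pyGetD (PySem.List.pyGetD gamDb i []) 5 "")).getD 0 == 0
            then false else st.2)
      else st)
    (0, true)

-- ===== PORT B =====
def findGame_alt (gameId : String) (gamDb : List (List String)) : Int × Bool :=
  let idxs := ((PySem.List.enumerate gamDb 0).filter
                 (fun p => PySem.List.pyGetD p.2 0 "" == gameId)).map (fun p => p.1)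
  let barisGame := if idxs ≠ [] then PySem.List.pyGetD idxs (-1) 0 else 0
  let isAvail := idxs.all (fun i =>
    (PySem.Int.ofStr? (PySem.List.pyGetD (PySem.List.pyGetD gamDb i []) 5 "")).getD 0 != 0)
  (barisGame, isAvail)

-- ===== PRECONDITION & SPEC =====
-- Exactly the inputs on which Python A returns: every row is nonempty (row[0] is read for
-- every row), and every row matching gameId has at least 6 fields with an int()-parsable field 5.
def Pre_findGame (gameId : String) (gamDb : List (List String)) : Prop :=
  ∀ row ∈ gamDb, row ≠ [] ∧
    (PySem.List.pyGetD row 0 "" = gameId →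
      6 ≤ row.length ∧ (PySem.Int.ofStr? (PySem.List.pyGetD row 5 "")).isSome)
instance (gameId : String) (gamDb : List (List String)) : Decidable (Pre_findGame gameId gamDb) := by
  unfold Pre_findGame; infer_instance
def pvWitness_findGame : String × List (List String) :=
  ("g1", [["g1", "a", "b", "c", "d", "3"], ["g2", "a", "b"]])

def Spec_findGame (gameId : String) (gamDb : List (List String)) (out : Int × Bool) : Prop := out = findGame_alt gameId gamDb
instance (gameId : String) (gamDb : List (List String)) (out : Int × Bool) : Decidable (Spec_findGame gameId gamDb out) := by unfold Spec_findGame; infer_instance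

-- ===== CLAIM (what is proved, stated in full; the proofs are below) =====
def Claim_equal_findGame : Prop := ∀ (gameId : String) (gamDb : List (List String)), Dom_findGame gameId gamDb → Pre_findGame gameId gamDb → Spec_findGame gameId gamDb (findGame gameId gamDb)

-- ===== LEMMAS AND PROOFS =====

-- the two row-level tests, shared by the proofs
def pvMatch (gameId : String) (p : Int × List String) : Bool :=
  PySem.List.pyGetD p.2 0 "" == gameId
def pvStockZero (row : List String) : Bool :=
  (PySem.Int.ofStr? (PySem.List.pyGetD row 5 "")).getD 0 == 0

lemma panjangPort_eq {α : Type} (xs : List α) : panjangPort xs = (xs.length : Int) := by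
  have h : ∀ (c : Int), xs.foldl (fun c _ => c + 1) c = c + xs.length := by
    induction xs with
    | nil => simp
    | cons x t ih => intro c; simp [List.foldl_cons, ih]; ring
  simpa [panjangPort] using h 0

-- A's accumulating loop over a suffix, characterised as last-match-index and an all-reduction
lemma foldA_eq (gameId : String) (xs : List (List String)) (s b : Int) (av : Bool) :
    (PySem.List.enumerate xs s).foldl
      (fun (st : Int × Bool) p =>
        if pvMatch gameId p then (p.1, if pvStockZero p.2 then false else st.2) else st)
      (b, av)
    = ((((PySem.List.enumerate xs s).filter (pvMatch gameId)).map (fun p => p.1)).getLastD b,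
       av && ((PySem.List.enumerate xs s).filter (pvMatch gameId)).all (fun p => !pvStockZero p.2)) := by
  induction xs generalizing s b av with
  | nil => simp [PySem.List.enumerate_nil]
  | cons x t ih =>
    rw [PySem.List.enumerate_cons, List.foldl_cons, List.filter_cons]
    cases hm : pvMatch gameId (s, x) with
    | false =>
        simp only [Bool.false_eq_true, reduceIte]
        exact ih (s + 1) b av
    | true =>
        simp only [reduceIte, List.map_cons, List.getLastD_cons, List.all_cons, ih]
        cases hst : pvStockZero x <;> simp

-- for a filtered enumerate entry, re-indexing the table gives back the row
lemma pvRow_eq (gamDb : List (List String)) (pr : Bool → (Int × List String) → Bool)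
    (c : Bool) (p : Int × List String)
    (hp : p ∈ (PySem.List.enumerate gamDb 0).filter (pr c)) :
    PySem.List.pyGetD gamDb p.1 [] = p.2 := by
  have hp' := List.mem_of_mem_filter hp
  rw [PySem.List.mem_enumerate_iff] at hp'
  obtain ⟨k, hk, rfl⟩ := hp'
  simp [List.getElem?_eq_getElem hk]

-- the all-reduction over collected indices equals the all-reduction over the filtered rows
lemma pvAllIdx (gamDb : List (List String)) (pr : (Int × List String) → Bool)
    (q : List String → Bool) :
    ((((PySem.List.enumerate gamDb 0).filter pr).map (fun p => p.1)).all
        (fun i => q (PySem.List.pyGetD gamDb i [])))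
    = ((PySem.List.enumerate gamDb 0).filter pr).all (fun p => q p.2) := by
  rw [List.all_map, Bool.eq_iff_iff]
  simp only [List.all_eq_true, Function.comp]
  constructor
  · intro h p hp
    rw [← pvRow_eq gamDb (fun _ => pr) true p hp]; exact h p hp
  · intro h p hp
    rw [pvRow_eq gamDb (fun _ => pr) true p hp]; exact h p hp

theorem findGame_spec : Claim_equal_findGame := by
  intro gameId gamDb _ _
  unfold Spec_findGame findGame findGame_alt
  rw [panjangPort_eq]
  have hlen : ((gamDb.length : Int)) = PySem.List.len gamDb := (PySem.List.len_eq gamDb).symm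
  rw [hlen]
  have hA : (PySem.List.pyRange 0 (PySem.List.len gamDb)).foldl
      (fun (st : Int × Bool) i =>
        if PySem.List.pyGetD (PySem.List.pyGetD gamDb i []) 0 "" == gameId then
          (i, if (PySem.Int.ofStr? (PySem.List.pyGetD (PySem.List.pyGetD gamDb i []) 5 "")).getD 0 == 0
              then false else st.2)
        else st) (0, true)
      = (PySem.List.enumerate gamDb).foldl
        (fun (st : Int × Bool) p =>
          if pvMatch gameId p then (p.1, if pvStockZero p.2 then false else st.2) else st)
        (0, true) := by
    rw [PySem.List.enumerate_eq_map_pyRange gamDb ([] : List String), List.foldl_map]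
    rfl
  rw [hA, foldA_eq, Bool.true_and]
  refine Prod.ext ?_ ?_
  · show (((PySem.List.enumerate gamDb 0).filter
        (fun p => PySem.List.pyGetD p.2 0 "" == gameId)).map (fun p => p.1)).getLastD 0 = _
    by_cases h : (((PySem.List.enumerate gamDb 0).filter
        (fun p => PySem.List.pyGetD p.2 0 "" == gameId)).map (fun p => p.1)) = []
    · simp [h]
    · simp only [h, ne_eq, not_false_eq_true, if_pos,
        PySem.List.pyGetD_neg_one _ 0 h, List.getLastD_eq_getLast?,
        List.getLast?_eq_some_getLast h, Option.getD_some]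
  · exact (pvAllIdx gamDb (fun p => PySem.List.pyGetD p.2 0 "" == gameId)
      (fun row => !pvStockZero row)).symm
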